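-- pv_equiv track=rewrite | github.com/zhouqing01/python- | HiddenText.py | check
-- ===== SOURCE A (Python) =====
-- def check(source, sub_str):
--     if (sub_str == ""):
--         return True
--     if len(source) == 1 or len(sub_str) == 1:
--         return sub_str in source
--     for i in range(1, len(source) // (len(sub_str) - 1) + 1):
--         for j in range(i):
--             if sub_str in source[j::i]:
--                 return True
--     return False
-- ===== SOURCE B (Python) =====
-- def check(source, sub_str):
--     m = len(sub_str)
--     if m == 0:
--         return True
--     n = len(source)
--     if n == 1 or m == 1:
--         return sub_str in source
--     for i in range(1, n // (m - 1) + 1):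
--         for p in range(n - (m - 1) * i):
--             if all(source[p + k * i] == sub_str[k] for k in range(m)):
--                 return True
--     return False
-- ===== Notes on version B (the rewrite author's own statement) =====
-- stated objective: alternative
-- what changed: Instead of materialising every strided slice source[j::i] and running Python's substring search over it, B walks start positions directly: for each stride i it tests every start p with p+(m-1)*i in range whether source[p+k*i] == sub_str[k] for all k, so no slice is ever built.
import Mathlib
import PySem

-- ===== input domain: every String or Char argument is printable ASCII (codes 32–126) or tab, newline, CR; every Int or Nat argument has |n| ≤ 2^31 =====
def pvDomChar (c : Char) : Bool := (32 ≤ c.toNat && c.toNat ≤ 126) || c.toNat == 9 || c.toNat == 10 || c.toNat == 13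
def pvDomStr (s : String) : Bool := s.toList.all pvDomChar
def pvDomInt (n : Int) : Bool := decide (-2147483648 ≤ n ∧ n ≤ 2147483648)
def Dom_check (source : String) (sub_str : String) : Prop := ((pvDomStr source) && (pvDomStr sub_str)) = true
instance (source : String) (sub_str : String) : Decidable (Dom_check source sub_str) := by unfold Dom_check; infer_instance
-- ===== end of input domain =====

-- B replaces A's strided-slice construction + substring search by a direct index walk over
-- start positions (no slice is ever built); objective: alternative decomposition, same results.

-- ===== PORT A =====
-- literal port of A: build source[j::i] with slice?, substring-test with isIn;
-- the `none` branch of the match is unreachable (a slice with step i ≥ 1 never raises in Python).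
def check (source : String) (sub_str : String) : Bool :=
  let src := source.toList
  let sub := sub_str.toList
  if sub.isEmpty then true
  else if src.length == 1 || sub.length == 1 then PySem.Chars.isIn sub src
  else
    (PySem.List.pyRange 1 (PySem.Int.floordiv (src.length : Int) ((sub.length : Int) - 1) + 1)).any fun i =>
      (PySem.List.pyRange 0 i).any fun j =>
        match PySem.List.slice? src (some j) none i with
        | some sl => PySem.Chars.isIn sub sl
        | none => false

-- ===== PORT B =====
-- literal port of B: for each stride i, test every admissible start p directly;
-- `source[p+k*i] == sub_str[k]` is ported as Option equality on getElem? — exact here,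
-- since every index B probes is nonnegative and within range by the loop bound on p.
def check_alt (source : String) (sub_str : String) : Bool :=
  let src := source.toList
  let sub := sub_str.toList
  let m := sub.length
  if m == 0 then true
  else
    let n := src.length
    if n == 1 || m == 1 then PySem.Chars.isIn sub src
    else
      (PySem.List.pyRange 1 (PySem.Int.floordiv (n : Int) ((m : Int) - 1) + 1)).any fun i =>
        (PySem.List.pyRange 0 ((n : Int) - ((m : Int) - 1) * i)).any fun p =>
          (List.range m).all fun k => src[(p + (k : Int) * i).toNat]? == sub[k]?

-- ===== PRECONDITION & SPEC =====
def Spec_check (source : String) (sub_str : String) (out : Bool) : Prop := out = check_alt source sub_str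
instance (source : String) (sub_str : String) (out : Bool) : Decidable (Spec_check source sub_str out) := by unfold Spec_check; infer_instance

-- ===== CLAIM (what is proved, stated in full; the proofs are below) =====
def Claim_equal_check : Prop := ∀ (source : String) (sub_str : String), Dom_check source sub_str → Spec_check source sub_str (check source sub_str)

-- ===== LEMMAS AND PROOFS =====

-- the strided selection source[a::i] truncated to r elements, as a map over indices
def pvStrided (src : List Char) (a i r : Nat) : List Char :=
  (List.range r).map (fun k => src.getD (a + i * k) ' ')

-- number of elements of src[a::i]
def pvCnt (n a i : Nat) : Nat := (n - a + i - 1) / i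

-- "sub matches in src starting at t with stride i"
def pvMatch (src sub : List Char) (t i : Nat) : Prop :=
  ∀ k < sub.length, src[t + i * k]? = sub[k]?

-- L1: slice? with nonnegative start, no stop, positive step is the strided map
lemma pv_slice?_eq (src : List Char) (j i : Int) (hj : 0 ≤ j) (hi : 0 < i) :
    PySem.List.slice? src (some j) none i
      = some (pvStrided src j.toNat i.toNat (pvCnt src.length j.toNat i.toNat)) := by
  have hine : i ≠ 0 := by omega
  have hjn : (j.toNat : Int) = j := Int.toNat_of_nonneg hj
  have hin : (i.toNat : Int) = i := Int.toNat_of_nonneg (le_of_lt hi)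
  simp only [PySem.List.slice?, PySem.List.sliceIndices, if_neg hine]
  have hstep : ¬ (i < 0) := by omega
  have hjneg : ¬ (j < 0) := by omega
  simp only [if_neg hstep, if_pos hi, if_neg hjneg]
  set n := src.length with hn
  by_cases hcase : j < (n : Int)
  · rw [if_pos (show min j (n : Int) < (n : Int) by omega)]
    have hmin : min j (n : Int) = j := by omega
    rw [hmin]
    have hcnt : (((n : Int) - j + i - 1) / i).toNat = pvCnt n j.toNat i.toNat := by
      unfold pvCnt
      have e : ((n : Int) - j + i - 1) = ((n - j.toNat + i.toNat - 1 : Nat) : Int) := by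
        omega
      rw [e, ← hin, ← Int.natCast_div, Int.toNat_natCast, Int.toNat_natCast]
    rw [hcnt]
    congr 1
    unfold pvStrided
    have hmem : ∀ k ∈ List.range (pvCnt n j.toNat i.toNat),
        src[(j + i * (k : Int)).toNat]? = some (src.getD (j.toNat + i.toNat * k) ' ') := by
      intro k hk
      rw [List.mem_range] at hk
      have hidx : j.toNat + i.toNat * k < n := by
        unfold pvCnt at hk
        have h1 : k + 1 ≤ (n - j.toNat + i.toNat - 1) / i.toNat := hk
        rw [Nat.le_div_iff_mul_le (by omega)] at h1
        have e2 : (k + 1) * i.toNat = i.toNat * k + i.toNat := by ring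
        rw [e2] at h1
        generalize i.toNat * k = Y at *
        omega
      have e3 : (j + i * (k : Int)).toNat = j.toNat + i.toNat * k := by
        conv_lhs => rw [← hjn, ← hin, ← Nat.cast_mul, ← Nat.cast_add, Int.toNat_natCast]
      rw [e3, List.getElem?_eq_getElem hidx, List.getD_eq_getElem _ _ hidx]
    rw [List.filterMap_congr hmem]
    exact congrFun (List.filterMap_eq_map (f := fun k => src.getD (j.toNat + i.toNat * k) ' ')) _
  · have hmin : min j (n : Int) = (n : Int) := by omega
    rw [hmin, if_neg (show ¬ ((n : Int) < (n : Int)) by omega)]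
    have hcnt0 : pvCnt n j.toNat i.toNat = 0 := by
      unfold pvCnt
      rw [show n - j.toNat = 0 by omega]
      exact Nat.div_eq_of_lt (by omega)
    rw [hcnt0]
    simp [pvStrided]

-- L2: dropping q elements of a strided list shifts the start
lemma pv_strided_drop (src : List Char) (a i r q : Nat) :
    (pvStrided src a i r).drop q = pvStrided src (a + i * q) i (r - q) := by
  unfold pvStrided
  rw [← List.map_drop, List.range_eq_range', List.drop_range', List.range'_eq_map_range]
  simp only [Nat.zero_add, Nat.mul_one, List.map_map]
  apply List.map_congr_left
  intro k _
  simp only [Function.comp_apply]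
  ring_nf

-- L3: prefix of a strided list, elementwise
lemma pv_prefix_strided (src sub : List Char) (a i r : Nat) :
    sub <+: pvStrided src a i r
      ↔ sub.length ≤ r ∧ ∀ k < sub.length, src.getD (a + i * k) ' ' = sub.getD k ' ' := by
  rw [List.prefix_iff_eq_take]
  unfold pvStrided
  rw [← List.map_take, List.take_range]
  constructor
  · intro h
    have hlen : sub.length = min sub.length r := by
      conv_lhs => rw [h]
      simp
    refine ⟨by omega, ?_⟩
    intro k hk
    have hk' : k < (List.map (fun k => src.getD (a + i * k) ' ') (List.range (min sub.length r))).length := by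
      simpa using by omega
    have := congrArg (fun l => l.getD k ' ') h
    simp only at this
    rw [this, List.getD_eq_getElem _ _ hk']
    simp
  · rintro ⟨hle, h⟩
    have hmin : min sub.length r = sub.length := by omega
    rw [hmin]
    apply List.ext_getElem
    · simp
    · intro k hk1 hk2
      have hk : k < sub.length := hk1
      have := h k hk
      rw [List.getD_eq_getElem _ _ hk1] at this
      rw [← this]
      simp

-- L4: under the in-range bound the getD formulation is pvMatch
lemma pv_match_iff (src sub : List Char) (t i : Nat) (hm : 1 ≤ sub.length)
    (hb : t + i * (sub.length - 1) < src.length) :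
    ((∀ k < sub.length, src.getD (t + i * k) ' ' = sub.getD k ' ') ↔ pvMatch src sub t i) := by
  unfold pvMatch
  apply forall_congr'
  intro k
  apply imp_congr_right
  intro hk
  have hidx : t + i * k < src.length := by
    have : i * k ≤ i * (sub.length - 1) := Nat.mul_le_mul_left i (by omega)
    omega
  rw [List.getElem?_eq_getElem hidx, List.getElem?_eq_getElem hk]
  rw [List.getD_eq_getElem _ _ hidx, List.getD_eq_getElem _ _ hk]
  simp

-- L5: room for a full match inside the strided list = in-range bound on the start
lemma pv_cnt_iff (n a i q m : Nat) (hi : 0 < i) (hm : 1 ≤ m) :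
    m ≤ pvCnt n a i - q ↔ a + i * q + i * (m - 1) < n := by
  unfold pvCnt
  have h1 : m ≤ (n - a + i - 1) / i - q ↔ m + q ≤ (n - a + i - 1) / i := by omega
  rw [h1, Nat.le_div_iff_mul_le hi]
  have e1 : (m + q) * i = i * m + i * q := by ring
  have e2 : i * (m - 1) = i * m - i := by
    cases m with
    | zero => omega
    | succ m' => simp [Nat.mul_succ]
  have hX : i ≤ i * m := Nat.le_mul_of_pos_right i hm
  rw [e1, e2]
  generalize i * m = X at *
  generalize i * q = Y at *
  omega

-- the two inner loops agree at every stride i ≥ 1 (for sub.length ≥ 2)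
lemma pv_inner_eq (src sub : List Char) (i : Int) (hi : 1 ≤ i) (hm : 2 ≤ sub.length) :
    ((PySem.List.pyRange 0 i).any fun j =>
        match PySem.List.slice? src (some j) none i with
        | some sl => PySem.Chars.isIn sub sl
        | none => false)
      = ((PySem.List.pyRange 0 ((src.length : Int) - ((sub.length : Int) - 1) * i)).any fun p =>
          (List.range sub.length).all fun k => src[(p + (k : Int) * i).toNat]? == sub[k]?) := by
  have hi0 : (0:Int) < i := by omega
  have hin : (i.toNat : Int) = i := Int.toNat_of_nonneg (by omega)
  have hiN : 0 < i.toNat := by omega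
  have hm1 : 1 ≤ sub.length := by omega
  have hcast : ((sub.length : Int) - 1) * i = (((sub.length - 1) * i.toNat : Nat) : Int) := by
    conv_lhs => rw [← hin]
    push_cast [Nat.cast_sub hm1]
    ring
  have hidxe : ∀ (t k : Nat), ((t : Int) + (k : Int) * i).toNat = t + i.toNat * k := by
    intro t k
    conv_lhs => rw [← hin, ← Nat.cast_mul, ← Nat.cast_add, Int.toNat_natCast]
    ring
  rw [Bool.eq_iff_iff, List.any_eq_true, List.any_eq_true]
  constructor
  · rintro ⟨j, hjmem, hcond⟩
    rw [PySem.List.mem_pyRange_one] at hjmem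
    obtain ⟨hj0, hji⟩ := hjmem
    have hcond' : PySem.Chars.isIn sub
        (pvStrided src j.toNat i.toNat (pvCnt src.length j.toNat i.toNat)) = true := by
      simpa [pv_slice?_eq src j i hj0 hi0] using hcond
    rw [← PySem.Chars.exists_prefix_drop_iff_isIn] at hcond'
    obtain ⟨q, hpre⟩ := hcond'
    rw [pv_strided_drop, pv_prefix_strided] at hpre
    obtain ⟨hle, hall⟩ := hpre
    have hb : j.toNat + i.toNat * q + i.toNat * (sub.length - 1) < src.length :=
      (pv_cnt_iff src.length j.toNat i.toNat q sub.length hiN hm1).mp hle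
    set t := j.toNat + i.toNat * q with ht
    have hmatch : pvMatch src sub t i.toNat :=
      (pv_match_iff src sub t i.toNat hm1 hb).mp hall
    refine ⟨(t : Int), ?_, ?_⟩
    · rw [PySem.List.mem_pyRange_one]
      refine ⟨by positivity, ?_⟩
      rw [hcast]
      have : t + (sub.length - 1) * i.toNat < src.length := by
        have e : (sub.length - 1) * i.toNat = i.toNat * (sub.length - 1) := by ring
        omega
      omega
    · rw [List.all_eq_true]
      intro k hk
      rw [List.mem_range] at hk
      rw [beq_iff_eq, hidxe t k]
      exact hmatch k hk
  · rintro ⟨p, hpmem, hcond⟩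
    rw [PySem.List.mem_pyRange_one] at hpmem
    obtain ⟨hp0, hpb⟩ := hpmem
    set t := p.toNat with htdef
    have hpt : (t : Int) = p := Int.toNat_of_nonneg hp0
    have hb : t + i.toNat * (sub.length - 1) < src.length := by
      rw [hcast] at hpb
      have e : (sub.length - 1) * i.toNat = i.toNat * (sub.length - 1) := by ring
      omega
    have hmatch : pvMatch src sub t i.toNat := by
      intro k hk
      rw [List.all_eq_true] at hcond
      have := hcond k (List.mem_range.mpr hk)
      rw [beq_iff_eq] at this
      rw [← hidxe t k, hpt]
      exact this
    refine ⟨((t % i.toNat : Nat) : Int), ?_, ?_⟩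
    · rw [PySem.List.mem_pyRange_one]
      constructor
      · positivity
      · rw [← hin]
        exact_mod_cast Nat.mod_lt t hiN
    · have hj0 : (0:Int) ≤ ((t % i.toNat : Nat) : Int) := by positivity
      rw [pv_slice?_eq src _ i hj0 hi0]
      simp only [Int.toNat_natCast]
      rw [← PySem.Chars.exists_prefix_drop_iff_isIn]
      refine ⟨t / i.toNat, ?_⟩
      rw [pv_strided_drop, pv_prefix_strided]
      have hsum : t % i.toNat + i.toNat * (t / i.toNat) = t := Nat.mod_add_div t i.toNat
      constructor
      · apply (pv_cnt_iff src.length (t % i.toNat) i.toNat (t / i.toNat) sub.length hiN hm1).mpr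
        omega
      · rw [hsum]
        exact (pv_match_iff src sub t i.toNat hm1 hb).mpr hmatch

-- ===== VERDICT (by name: the statement is the Claim_ definition above) =====
theorem check_spec : Claim_equal_check := by
  intro source sub_str _
  unfold Spec_check check check_alt
  simp only []
  set src := source.toList with hsrc
  set sub := sub_str.toList with hsub
  have hempty : sub.isEmpty = (sub.length == 0) := by cases sub <;> simp
  rw [hempty]
  by_cases h0 : sub.length = 0
  · simp [h0]
  · simp only [h0, beq_iff_eq]
    by_cases h1 : (src.length == 1 || sub.length == 1) = true
    · rw [if_pos h1, if_pos h1]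
    · rw [if_neg h1, if_neg h1]
      apply PySem.List.any_congr_mem
      intro i hi
      rw [PySem.List.mem_pyRange_one] at hi
      have hm : 2 ≤ sub.length := by
        simp only [Bool.or_eq_true, beq_iff_eq] at h1
        omega
      exact pv_inner_eq src sub i hi.1 hm
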